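-- pv_equiv track=rewrite | github.com/yojo999/Computational-Geometry-Dash-Application | comp_geom_helper.py | consecutive_among_three
-- ===== SOURCE A (Python) =====
-- def consecutive_among_three(nums):
--     """
--     Returns the length of the longest sequence of consecutive numbers among three numbers.
--     """
--     def max_consecutive_adjacent(lst):
--         max_count = 0
--         current_count = 1
--         for i in range(1, len(lst)):
--             if lst[i] - lst[i - 1] == 1:
--                 current_count += 1
--                 max_count = max(max_count, current_count)
--             else:
--                 current_count = 1
--         return max_count if max_count >= 2 else 0
--     return max(max_consecutive_adjacent(nums), max_consecutive_adjacent(nums[::-1]))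
-- ===== SOURCE B (Python) =====
-- def consecutive_among_three(nums):
--     """
--     Returns the length of the longest sequence of consecutive numbers among three numbers.
--     """
--     asc = desc = 1
--     best = 0
--     for i in range(1, len(nums)):
--         d = nums[i] - nums[i - 1]
--         asc = asc + 1 if d == 1 else 1
--         desc = desc + 1 if d == -1 else 1
--         best = max(best, asc, desc)
--     return best if best >= 2 else 0
-- ===== Notes on version B (the rewrite author's own statement) =====
-- stated objective: simpler
-- what changed: Replaces A's two scans (forward plus a scan of the reversed copy, each with its own >=2 threshold) by one forward pass keeping ascending and descending run counters and a single running max with the >=2 floor applied once at the end.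
import Mathlib
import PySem

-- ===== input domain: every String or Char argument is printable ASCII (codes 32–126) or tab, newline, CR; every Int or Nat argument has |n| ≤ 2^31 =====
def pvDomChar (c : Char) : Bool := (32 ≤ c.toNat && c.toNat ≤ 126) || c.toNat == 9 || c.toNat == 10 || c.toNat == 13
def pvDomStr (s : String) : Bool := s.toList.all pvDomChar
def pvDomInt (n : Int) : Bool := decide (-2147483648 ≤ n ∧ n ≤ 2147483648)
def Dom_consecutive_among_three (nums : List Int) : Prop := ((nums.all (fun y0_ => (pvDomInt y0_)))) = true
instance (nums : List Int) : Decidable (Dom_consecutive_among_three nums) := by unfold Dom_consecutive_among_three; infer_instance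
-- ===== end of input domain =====

-- B replaces A's two scans (forward + a scan of the reversed copy) by one forward pass
-- keeping ascending and descending run counters; objective: simpler (same O(n) cost).

-- ===== PORT A =====
-- the 'for i in range(1, len(lst))' loop of max_consecutive_adjacent, walking adjacent pairs
def pvMcaLoop (prev : Int) (rest : List Int) (mc : Int × Int) : Int × Int :=
  match rest with
  | [] => mc
  | y :: ys =>
      pvMcaLoop y ys (if y - prev = 1 then (max mc.1 (mc.2 + 1), mc.2 + 1) else (mc.1, 1))

def pvMaxConsecAdj (lst : List Int) : Int :=
  let mc := match lst with
    | [] => ((0 : Int), (1 : Int))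
    | x :: xs => pvMcaLoop x xs (0, 1)
  if mc.1 ≥ 2 then mc.1 else 0

def consecutive_among_three (nums : List Int) : Int :=
  max (pvMaxConsecAdj nums)
      (pvMaxConsecAdj ((PySem.List.slice? nums none none (-1)).getD []))

-- ===== PORT B =====
-- one pass: asc/desc counters, running max, >=2 floor once at the end
def pvAltLoop (prev : Int) (rest : List Int) (s : Int × Int × Int) : Int × Int × Int :=
  match rest with
  | [] => s
  | y :: ys =>
      let d := y - prev
      let a := if d = 1 then s.1 + 1 else 1
      let dc := if d = -1 then s.2.1 + 1 else 1
      pvAltLoop y ys (a, dc, max s.2.2 (max a dc))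

def consecutive_among_three_alt (nums : List Int) : Int :=
  let s := match nums with
    | [] => ((1 : Int), (1 : Int), (0 : Int))
    | x :: xs => pvAltLoop x xs (1, 1, 0)
  if s.2.2 ≥ 2 then s.2.2 else 0

-- ===== PRECONDITION & SPEC =====
def Spec_consecutive_among_three (nums : List Int) (out : Int) : Prop := out = consecutive_among_three_alt nums
instance (nums : List Int) (out : Int) : Decidable (Spec_consecutive_among_three nums out) := by unfold Spec_consecutive_among_three; infer_instance

-- ===== CLAIM (what is proved, stated in full; the proofs are below) =====
def Claim_equal_consecutive_among_three : Prop := ∀ (nums : List Int), Dom_consecutive_among_three nums → Spec_consecutive_among_three nums (consecutive_among_three nums)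

-- ===== LEMMAS AND PROOFS =====

-- length of the true-prefix of a boolean list
def pvPre : List Bool → Nat
  | [] => 0
  | b :: bs => if b then pvPre bs + 1 else 0

-- length of the longest true-run
def pvL : List Bool → Nat
  | [] => 0
  | b :: bs => if b then max (pvL bs) (pvPre bs + 1) else pvL bs

-- length of the true-suffix
def pvSuf (bs : List Bool) : Nat := pvPre bs.reverse

theorem pvPre_le_length (bs : List Bool) : pvPre bs ≤ bs.length := by
  induction bs with
  | nil => simp [pvPre]
  | cons b bs ih => cases b <;> simp [pvPre] <;> omega

theorem pvPre_eq_length_iff (bs : List Bool) : pvPre bs = bs.length ↔ ∀ b ∈ bs, b = true := by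
  induction bs with
  | nil => simp [pvPre]
  | cons b bs ih =>
      cases b
      · have := pvPre_le_length bs
        simp [pvPre]
      · simp [pvPre, ih]

theorem pvSuf_eq_length_iff (bs : List Bool) : pvSuf bs = bs.length ↔ ∀ b ∈ bs, b = true := by
  rw [pvSuf, show bs.length = bs.reverse.length by simp, pvPre_eq_length_iff]
  simp

theorem pvL_eq_length_of_alltrue (bs : List Bool) (h : ∀ b ∈ bs, b = true) :
    pvL bs = bs.length := by
  induction bs with
  | nil => simp [pvL]
  | cons b bs ih =>
      have hb : b = true := h b (by simp)
      have h' : ∀ b ∈ bs, b = true := fun x hx => h x (by simp [hx])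
      have hpre : pvPre bs = bs.length := (pvPre_eq_length_iff bs).mpr h'
      subst hb
      simp [pvL, ih h', hpre]

theorem pvPre_append_false (bs : List Bool) : pvPre (bs ++ [false]) = pvPre bs := by
  induction bs with
  | nil => simp [pvPre]
  | cons c bs ih => cases c <;> simp [pvPre, ih]

theorem pvPre_append_true (bs : List Bool) :
    pvPre (bs ++ [true]) = pvPre bs + (if pvPre bs = bs.length then 1 else 0) := by
  induction bs with
  | nil => simp [pvPre]
  | cons c bs ih =>
      cases c
      · simp [pvPre]
      · simp [pvPre, ih]
        split_ifs <;> omega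

theorem pvSuf_append_false (bs : List Bool) : pvSuf (bs ++ [false]) = 0 := by
  simp [pvSuf, pvPre]

theorem pvSuf_append_true (bs : List Bool) : pvSuf (bs ++ [true]) = pvSuf bs + 1 := by
  simp [pvSuf, pvPre]

theorem pvSuf_cons_false (bs : List Bool) : pvSuf (false :: bs) = pvSuf bs := by
  have : pvSuf (false :: bs) = pvPre (bs.reverse ++ [false]) := by simp [pvSuf]
  rw [this, pvPre_append_false]
  rfl

theorem pvSuf_cons_true (bs : List Bool) :
    pvSuf (true :: bs) = pvSuf bs + (if pvSuf bs = bs.length then 1 else 0) := by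
  have h : pvSuf (true :: bs) = pvPre (bs.reverse ++ [true]) := by simp [pvSuf]
  rw [h, pvPre_append_true]
  have : bs.reverse.length = bs.length := by simp
  rw [this]
  rfl

theorem pvL_append_false (bs : List Bool) : pvL (bs ++ [false]) = pvL bs := by
  induction bs with
  | nil => simp [pvL]
  | cons c bs ih => cases c <;> simp [pvL, ih, pvPre_append_false]

theorem pvL_append_true (bs : List Bool) :
    pvL (bs ++ [true]) = max (pvL bs) (pvSuf bs + 1) := by
  induction bs with
  | nil => simp [pvL, pvPre, pvSuf]
  | cons c bs ih =>
      cases c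
      · rw [List.cons_append]
        simp only [pvL, Bool.false_eq_true, if_false, ih, pvSuf_cons_false]
      · rw [List.cons_append]
        simp only [pvL, if_true, ih, pvPre_append_true, pvSuf_cons_true]
        by_cases hfull : pvPre bs = bs.length
        · have hall : ∀ x ∈ bs, x = true := (pvPre_eq_length_iff bs).mp hfull
          have hsuf : pvSuf bs = bs.length := (pvSuf_eq_length_iff bs).mpr hall
          have hL : pvL bs = bs.length := pvL_eq_length_of_alltrue bs hall
          rw [if_pos hfull, if_pos hsuf]
          omega
        · have hsufne : ¬ pvSuf bs = bs.length := fun h =>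
            hfull ((pvPre_eq_length_iff bs).mpr ((pvSuf_eq_length_iff bs).mp h))
          rw [if_neg hfull, if_neg hsufne]
          omega

theorem pvL_reverse (bs : List Bool) : pvL bs.reverse = pvL bs := by
  induction bs with
  | nil => rfl
  | cons b bs ih =>
      have hsp : pvSuf bs.reverse = pvPre bs := by simp [pvSuf]
      cases b
      · rw [List.reverse_cons, pvL_append_false, ih]
        simp [pvL]
      · rw [List.reverse_cons, pvL_append_true, hsp, ih]
        simp [pvL]

-- boolean difference streams of an int list
def pvAscF : Int → List Int → List Bool
  | _, [] => []
  | p, y :: ys => decide (y - p = 1) :: pvAscF y ys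

def pvDescF : Int → List Int → List Bool
  | _, [] => []
  | p, y :: ys => decide (y - p = -1) :: pvDescF y ys

def pvAscB : List Int → List Bool
  | [] => []
  | x :: xs => pvAscF x xs

def pvDescB : List Int → List Bool
  | [] => []
  | x :: xs => pvDescF x xs

def pvDiffs : Int → List Int → List Int
  | _, [] => []
  | p, y :: ys => (y - p) :: pvDiffs y ys

theorem pvAscF_append (ys : List Int) (p z : Int) :
    pvAscF p (ys ++ [z]) = pvAscF p ys ++ [decide (z - ys.getLastD p = 1)] := by
  induction ys generalizing p with
  | nil => simp [pvAscF]
  | cons y ys ih =>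
      simp only [List.cons_append, pvAscF, ih, List.getLastD_cons]

theorem pvAscB_rev (l : List Int) : pvAscB l.reverse = (pvDescB l).reverse := by
  cases l with
  | nil => rfl
  | cons x xs =>
      induction xs generalizing x with
      | nil => rfl
      | cons y ys ih =>
          have hrev : (x :: y :: ys).reverse = ((y :: ys).reverse) ++ [x] := by simp
          have hne : (y :: ys).reverse ≠ [] := by simp
          obtain ⟨z, zs, hz⟩ := List.exists_cons_of_ne_nil hne
          have hlast : zs.getLastD z = y := by
            have h1 : (z :: zs).getLastD 0 = ((y :: ys).reverse).getLastD 0 := by rw [hz]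
            have h2 : ((y :: ys).reverse).getLastD 0 = y := by
              rw [List.getLastD_eq_getLast?, List.getLast?_reverse]
              rfl
            rw [List.getLastD_cons] at h1
            rw [h1, h2]
          calc pvAscB (x :: y :: ys).reverse
              = pvAscF z (zs ++ [x]) := by rw [hrev, hz]; rfl
            _ = pvAscF z zs ++ [decide (x - y = 1)] := by rw [pvAscF_append, hlast]
            _ = pvAscB ((y :: ys).reverse) ++ [decide (x - y = 1)] := by rw [hz]; rfl
            _ = (pvDescB (y :: ys)).reverse ++ [decide (x - y = 1)] := by rw [ih y]
            _ = (pvDescB (x :: y :: ys)).reverse := by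
                have : decide (x - y = 1) = decide (y - x = -1) := by
                  simp only [decide_eq_decide]; omega
                simp [pvDescB, pvDescF, this]

-- fold forms of the two loops
def pvStepA (mc : Int × Int) (b : Bool) : Int × Int :=
  if b then (max mc.1 (mc.2 + 1), mc.2 + 1) else (mc.1, 1)

def pvStepB (s : Int × Int × Int) (d : Int) : Int × Int × Int :=
  let a := if d = 1 then s.1 + 1 else 1
  let dc := if d = -1 then s.2.1 + 1 else 1
  (a, dc, max s.2.2 (max a dc))

theorem pvMcaLoop_eq_fold (ys : List Int) (prev : Int) (mc : Int × Int) :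
    pvMcaLoop prev ys mc = List.foldl pvStepA mc (pvAscF prev ys) := by
  induction ys generalizing prev mc with
  | nil => rfl
  | cons y ys ih =>
      by_cases h : y - prev = 1 <;> simp [pvMcaLoop, pvAscF, pvStepA, h, ih]

theorem pvAltLoop_eq_fold (ys : List Int) (prev : Int) (s : Int × Int × Int) :
    pvAltLoop prev ys s = List.foldl pvStepB s (pvDiffs prev ys) := by
  induction ys generalizing prev s with
  | nil => rfl
  | cons y ys ih => simp [pvAltLoop, pvDiffs, pvStepB, ih]

theorem pvAscF_eq_map (ys : List Int) (p : Int) :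
    pvAscF p ys = (pvDiffs p ys).map (fun d => decide (d = 1)) := by
  induction ys generalizing p with
  | nil => rfl
  | cons y ys ih => simp [pvAscF, pvDiffs, ih]

theorem pvDescF_eq_map (ys : List Int) (p : Int) :
    pvDescF p ys = (pvDiffs p ys).map (fun d => decide (d = -1)) := by
  induction ys generalizing p with
  | nil => rfl
  | cons y ys ih => simp [pvDescF, pvDiffs, ih]

theorem pvFoldA_spec (bs : List Bool) :
    List.foldl pvStepA ((0 : Int), (1 : Int)) bs =
      ((if pvL bs = 0 then 0 else (pvL bs : Int) + 1), (pvSuf bs : Int) + 1) := by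
  induction bs using List.reverseRecOn with
  | nil => simp [pvL, pvSuf, pvPre]
  | append_singleton bs b ih =>
      rw [List.foldl_append, ih]
      cases b
      · rw [pvL_append_false, pvSuf_append_false]
        simp [pvStepA]
      · rw [pvL_append_true, pvSuf_append_true]
        simp only [pvStepA, List.foldl_cons, List.foldl_nil, if_true, Prod.mk.injEq]
        constructor
        · split_ifs <;> push_cast <;> omega
        · push_cast; omega

theorem pvFoldB_spec (ds : List Int) :
    List.foldl pvStepB ((1 : Int), (1 : Int), (0 : Int)) ds =
      ((pvSuf (ds.map (fun d => decide (d = 1))) : Int) + 1,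
       (pvSuf (ds.map (fun d => decide (d = -1))) : Int) + 1,
       if ds = [] then 0
       else (max (pvL (ds.map (fun d => decide (d = 1)))) (pvL (ds.map (fun d => decide (d = -1)))) : Int) + 1) := by
  induction ds using List.reverseRecOn with
  | nil => simp [pvSuf, pvPre]
  | append_singleton ds d ih =>
      rw [List.foldl_append, ih]
      have h1 : (ds ++ [d]).map (fun d => decide (d = 1)) =
          ds.map (fun d => decide (d = 1)) ++ [decide (d = 1)] := by simp
      have h2 : (ds ++ [d]).map (fun d => decide (d = -1)) =
          ds.map (fun d => decide (d = -1)) ++ [decide (d = -1)] := by simp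
      have hne : ds ++ [d] ≠ [] := by simp
      rw [h1, h2, if_neg hne]
      rcases eq_or_ne ds [] with hds | hds
      · subst hds
        by_cases ha : d = 1 <;> by_cases hb : d = -1 <;>
          simp [pvStepB, ha, hb, pvL, pvSuf, pvPre, Prod.ext_iff] <;> omega
      · rw [if_neg hds]
        rcases eq_or_ne d 1 with ha | ha
        · subst ha
          rw [show decide ((1:Int) = 1) = true from by decide,
              show decide ((1:Int) = -1) = false from by decide,
              pvL_append_true, pvL_append_false, pvSuf_append_true, pvSuf_append_false]
          simp [pvStepB, Prod.ext_iff] <;> omega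
        · rcases eq_or_ne d (-1) with hb | hb
          · subst hb
            rw [show decide ((-1:Int) = 1) = false from by decide,
                show decide ((-1:Int) = -1) = true from by decide,
                pvL_append_false, pvL_append_true, pvSuf_append_false, pvSuf_append_true]
            simp [pvStepB, Prod.ext_iff] <;> omega
          · rw [show decide (d = 1) = false from by simp [ha],
                show decide (d = -1) = false from by simp [hb],
                pvL_append_false, pvL_append_false, pvSuf_append_false, pvSuf_append_false]
            simp [pvStepB, Prod.ext_iff, ha, hb] <;> omega

theorem pvMca_eq (l : List Int) :
    pvMaxConsecAdj l = if 1 ≤ pvL (pvAscB l) then (pvL (pvAscB l) : Int) + 1 else 0 := by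
  cases l with
  | nil => simp [pvMaxConsecAdj, pvAscB, pvL]
  | cons x xs =>
      have hfold := pvFoldA_spec (pvAscF x xs)
      simp only [pvMaxConsecAdj, pvAscB, pvMcaLoop_eq_fold, hfold]
      by_cases h : pvL (pvAscF x xs) = 0
      · simp [h]
      · have h1 : 1 ≤ pvL (pvAscF x xs) := by omega
        simp only [if_neg h, if_pos h1]
        rw [if_pos (by push_cast; omega)]

theorem pvAlt_eq (l : List Int) :
    consecutive_among_three_alt l =
      if 1 ≤ max (pvL (pvAscB l)) (pvL (pvDescB l))
      then (max (pvL (pvAscB l)) (pvL (pvDescB l)) : Int) + 1 else 0 := by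
  cases l with
  | nil => simp [consecutive_among_three_alt, pvAscB, pvDescB, pvL]
  | cons x xs =>
      have hfold := pvFoldB_spec (pvDiffs x xs)
      rw [← pvAscF_eq_map xs x, ← pvDescF_eq_map xs x] at hfold
      cases xs with
      | nil =>
          simp [consecutive_among_three_alt, pvAltLoop, pvAscB, pvDescB, pvAscF, pvDescF, pvL]
      | cons y ys =>
          have hne : pvDiffs x (y :: ys) ≠ [] := by simp [pvDiffs]
          simp only [consecutive_among_three_alt, pvAltLoop_eq_fold, hfold, if_neg hne]
          simp only [pvAscB, pvDescB]
          by_cases h : 1 ≤ max (pvL (pvAscF x (y :: ys))) (pvL (pvDescF x (y :: ys)))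
          · rw [if_pos h, if_pos (by push_cast; omega)]
          · rw [if_neg h, if_neg (by push_cast; omega)]

theorem pvRevSlice (nums : List Int) :
    (PySem.List.slice? nums none none (-1)).getD [] = nums.reverse := by
  rw [PySem.List.slice?_none_none_neg_one]; rfl

-- ===== VERDICT (by name: the statement is the Claim_ definition above) =====
theorem consecutive_among_three_spec : Claim_equal_consecutive_among_three := by
  intro nums _
  unfold Spec_consecutive_among_three
  rw [pvAlt_eq]
  unfold consecutive_among_three
  rw [pvRevSlice, pvMca_eq, pvMca_eq, pvAscB_rev, pvL_reverse]
  by_cases h1 : 1 ≤ pvL (pvAscB nums) <;> by_cases h2 : 1 ≤ pvL (pvDescB nums) <;>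
    by_cases h3 : 1 ≤ max (pvL (pvAscB nums)) (pvL (pvDescB nums)) <;>
    simp [h1, h2, h3] <;> push_cast <;> omega
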